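-- pv_equiv track=rewrite | github.com/kypello/Scummpiler | costume_decoder.py | get_anim_offset_data
-- ===== SOURCE A (Python) =====
-- def get_anim_offset_data(anim_datas, anim_data_start):
--     anim_offset_data = []
--     offset = anim_data_start
--
--     for anim_data in anim_datas:
--         if len(anim_data) == 1:
--             anim_offset_data.append(0)
--             anim_offset_data.append(0)
--             continue
--
--         anim_offset_data.append(offset & 0xFF)
--         anim_offset_data.append((offset & 0xFF00) >> 8)
--         offset += len(anim_data)
--
--     return anim_offset_data
-- ===== SOURCE B (Python) =====
-- def get_anim_offset_data(anim_datas, anim_data_start):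
--     # pass 1: per-element starting offsets (length-1 elements do not advance)
--     offsets = []
--     off = anim_data_start
--     for anim_data in anim_datas:
--         offsets.append(off)
--         if len(anim_data) != 1:
--             off += len(anim_data)
--     # pass 2: emit two bytes per element
--     out = []
--     for anim_data, off in zip(anim_datas, offsets):
--         if len(anim_data) == 1:
--             out.extend([0, 0])
--         else:
--             out.extend([off & 0xFF, (off & 0xFF00) >> 8])
--     return out
-- ===== Notes on version B (the rewrite author's own statement) =====
-- stated objective: alternative
-- what changed: Replaces A's single loop that interleaves a running offset with byte emission by a two-pass decomposition: first a pass computing the per-element offset table, then a separate zip pass emitting the two bytes per element.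
import Mathlib
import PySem

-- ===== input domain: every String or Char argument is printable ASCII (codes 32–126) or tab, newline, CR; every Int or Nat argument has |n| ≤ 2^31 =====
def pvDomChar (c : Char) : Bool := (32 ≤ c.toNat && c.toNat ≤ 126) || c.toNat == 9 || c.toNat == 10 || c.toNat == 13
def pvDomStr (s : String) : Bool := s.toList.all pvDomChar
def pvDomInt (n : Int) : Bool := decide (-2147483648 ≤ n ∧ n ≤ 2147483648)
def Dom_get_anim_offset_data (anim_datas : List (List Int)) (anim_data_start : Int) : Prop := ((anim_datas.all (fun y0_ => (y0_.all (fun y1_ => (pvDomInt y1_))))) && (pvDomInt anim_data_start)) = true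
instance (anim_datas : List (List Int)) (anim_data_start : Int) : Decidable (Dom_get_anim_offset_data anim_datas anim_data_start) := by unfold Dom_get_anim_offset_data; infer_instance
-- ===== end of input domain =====

-- B replaces A's single loop interleaving a running offset with byte emission by a
-- two-pass decomposition (offset table first, then a zip pass emitting bytes); same cost.

-- ===== PORT A =====
-- A's for-loop: state = (accumulated output list, running offset)
def get_anim_offset_data (anim_datas : List (List Int)) (anim_data_start : Int) : List Int :=
  (anim_datas.foldl
    (fun (st : List Int × Int) anim_data =>
      if anim_data.length = 1 then
        (st.1 ++ [0, 0], st.2)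
      else
        (st.1 ++ [PySem.Int.band st.2 0xFF, (PySem.Int.band st.2 0xFF00) >>> (8 : Nat)],
         st.2 + (anim_data.length : Int)))
    ([], anim_data_start)).1

-- ===== PORT B =====
-- pass 1 of Source B: the per-element offset table
def pvOffsets (off : Int) : List (List Int) → List Int
  | [] => []
  | d :: ds => off :: pvOffsets (if d.length = 1 then off else off + (d.length : Int)) ds

-- pass 2 of Source B: emit two bytes per element
def get_anim_offset_data_alt (anim_datas : List (List Int)) (anim_data_start : Int) : List Int :=
  (anim_datas.zip (pvOffsets anim_data_start anim_datas)).flatMap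
    (fun p =>
      if p.1.length = 1 then [0, 0]
      else [PySem.Int.band p.2 0xFF, (PySem.Int.band p.2 0xFF00) >>> (8 : Nat)])

-- ===== PRECONDITION & SPEC =====
def Spec_get_anim_offset_data (anim_datas : List (List Int)) (anim_data_start : Int) (out : List Int) : Prop := out = get_anim_offset_data_alt anim_datas anim_data_start
instance (anim_datas : List (List Int)) (anim_data_start : Int) (out : List Int) : Decidable (Spec_get_anim_offset_data anim_datas anim_data_start out) := by unfold Spec_get_anim_offset_data; infer_instance

-- ===== CLAIM (what is proved, stated in full; the proofs are below) =====
def Claim_equal_get_anim_offset_data : Prop := ∀ (anim_datas : List (List Int)) (anim_data_start : Int), Dom_get_anim_offset_data anim_datas anim_data_start → Spec_get_anim_offset_data anim_datas anim_data_start (get_anim_offset_data anim_datas anim_data_start)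

-- ===== LEMMAS AND PROOFS =====

-- ===== VERDICT (by name: the statement is the Claim_ definition above) =====
-- loop invariant: A's fold from state (acc, off) yields acc ++ B's two-pass result
theorem pv_key (ds : List (List Int)) : ∀ (acc : List Int) (off : Int),
    (ds.foldl
      (fun (st : List Int × Int) anim_data =>
        if anim_data.length = 1 then
          (st.1 ++ [0, 0], st.2)
        else
          (st.1 ++ [PySem.Int.band st.2 0xFF, (PySem.Int.band st.2 0xFF00) >>> (8 : Nat)],
           st.2 + (anim_data.length : Int)))
      (acc, off)).1
    = acc ++ (ds.zip (pvOffsets off ds)).flatMap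
        (fun p =>
          if p.1.length = 1 then [0, 0]
          else [PySem.Int.band p.2 0xFF, (PySem.Int.band p.2 0xFF00) >>> (8 : Nat)]) := by
  induction ds with
  | nil => simp [pvOffsets]
  | cons d ds ih =>
    intro acc off
    by_cases h : d.length = 1 <;>
      simp [pvOffsets, h, ih, List.append_assoc]

theorem get_anim_offset_data_spec : Claim_equal_get_anim_offset_data := by
  intro ds off _
  unfold Spec_get_anim_offset_data get_anim_offset_data get_anim_offset_data_alt
  simpa using pv_key ds [] off
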